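-- pv_equiv track=rewrite | github.com/Anderche/ai_agent_aws_agentcore | app/faq.py | lookup_faq
-- ===== SOURCE A (Python) =====
-- from typing import Dict
--
-- def _normalize(text: str) -> str:
--     return " ".join(text.strip().lower().split())
--
-- def lookup_faq(question: str, faq_data: Dict[str, str]) -> str | None:
--     if not question or not faq_data:
--         return None
--
--     normalized_question = _normalize(question)
--     for stored_question, answer in faq_data.items():
--         if normalized_question == _normalize(stored_question):
--             return answer
--
--     for stored_question, answer in faq_data.items():
--         if normalized_question in _normalize(stored_question):
--             return answer
--     return None
-- ===== SOURCE B (Python) =====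
-- def _normalize(text: str) -> str:
--     return " ".join(text.strip().lower().split())
--
-- def lookup_faq(question, faq_data):
--     # single pass: return on exact match, remember first substring candidate
--     if not question or not faq_data:
--         return None
--     nq = _normalize(question)
--     candidate = None
--     for stored, answer in faq_data.items():
--         n = _normalize(stored)
--         if nq == n:
--             return answer
--         if candidate is None and nq in n:
--             candidate = answer
--     return candidate
-- ===== Notes on version B (the rewrite author's own statement) =====
-- stated objective: alternative
-- what changed: The two sequential scans (exact-match pass, then substring pass) are merged into one pass that returns immediately on an exact match and carries the first substring hit in an accumulator, so each stored question is normalized once instead of up to twice.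
import Mathlib
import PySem

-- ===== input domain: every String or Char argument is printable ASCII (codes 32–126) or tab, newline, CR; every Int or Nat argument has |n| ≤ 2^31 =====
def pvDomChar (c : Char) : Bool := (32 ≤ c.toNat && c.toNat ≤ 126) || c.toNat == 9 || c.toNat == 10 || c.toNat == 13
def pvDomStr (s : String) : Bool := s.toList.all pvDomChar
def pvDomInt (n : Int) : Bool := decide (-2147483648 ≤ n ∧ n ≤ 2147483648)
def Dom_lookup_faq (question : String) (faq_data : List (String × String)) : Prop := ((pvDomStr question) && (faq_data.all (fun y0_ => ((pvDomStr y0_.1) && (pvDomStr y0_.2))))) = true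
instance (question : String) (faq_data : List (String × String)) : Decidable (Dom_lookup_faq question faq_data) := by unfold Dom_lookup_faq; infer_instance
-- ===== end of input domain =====

-- B merges A's two sequential scans into one pass (early return on exact match,
-- first substring hit kept in an accumulator); objective: alternative (same cost).

-- shared helper: " ".join(text.strip().lower().split())
def pvNormalize (text : String) : String :=
  PySem.Str.join " " (PySem.Str.split₀ (PySem.Str.lower (PySem.Str.strip text)))

-- ===== PORT A =====
-- first loop of A: exact match
def pvExactScan (nq : String) : List (String × String) → Option String
  | [] => none
  | (q, a) :: rest => if nq == pvNormalize q then some a else pvExactScan nq rest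

-- second loop of A: substring match
def pvSubScan (nq : String) : List (String × String) → Option String
  | [] => none
  | (q, a) :: rest => if PySem.Str.isIn nq (pvNormalize q) then some a else pvSubScan nq rest

def lookup_faq (question : String) (faq_data : List (String × String)) : Option String :=
  if question == "" || faq_data.isEmpty then none
  else
    let nq := pvNormalize question
    match pvExactScan nq faq_data with
    | some a => some a
    | none => pvSubScan nq faq_data

-- ===== PORT B =====
-- single pass: return on exact match, carry first substring candidate
def pvOnePass (nq : String) : List (String × String) → Option String → Option String
  | [], cand => cand
  | (q, a) :: rest, cand =>
      let n := pvNormalize q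
      if nq == n then some a
      else pvOnePass nq rest (if cand.isNone && PySem.Str.isIn nq n then some a else cand)

def lookup_faq_alt (question : String) (faq_data : List (String × String)) : Option String :=
  if question == "" || faq_data.isEmpty then none
  else pvOnePass (pvNormalize question) faq_data none

-- ===== PRECONDITION & SPEC =====
def Spec_lookup_faq (question : String) (faq_data : List (String × String)) (out : Option String) : Prop := out = lookup_faq_alt question faq_data
instance (question : String) (faq_data : List (String × String)) (out : Option String) : Decidable (Spec_lookup_faq question faq_data out) := by unfold Spec_lookup_faq; infer_instance

-- ===== CLAIM (what is proved, stated in full; the proofs are below) =====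
def Claim_equal_lookup_faq : Prop := ∀ (question : String) (faq_data : List (String × String)), Dom_lookup_faq question faq_data → Spec_lookup_faq question faq_data (lookup_faq question faq_data)

-- ===== LEMMAS AND PROOFS =====

-- loop invariant: the one-pass result is the exact-scan hit if any, otherwise the
-- carried candidate if any, otherwise the substring-scan hit
lemma pvOnePass_eq (nq : String) (d : List (String × String)) (cand : Option String) :
    pvOnePass nq d cand =
      match pvExactScan nq d with
      | some a => some a
      | none => match cand with
        | some c => some c
        | none => pvSubScan nq d := by
  induction d generalizing cand with
  | nil =>
    cases cand <;> simp [pvOnePass, pvExactScan, pvSubScan]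
  | cons p rest ih =>
    obtain ⟨q, a⟩ := p
    by_cases h : nq == pvNormalize q
    · simp [pvOnePass, pvExactScan, h]
    · simp only [pvOnePass, pvExactScan, pvSubScan, h, Bool.false_eq_true, ite_false]
      rw [ih]
      cases cand with
      | some c => simp
      | none =>
        cases hx : pvExactScan nq rest <;>
          by_cases hs : PySem.Chars.isIn nq.toList (pvNormalize q).toList <;>
            simp [hx, hs]

-- ===== VERDICT (by name: the statement is the Claim_ definition above) =====
theorem lookup_faq_spec : Claim_equal_lookup_faq := by
  intro question faq_data _
  unfold Spec_lookup_faq lookup_faq lookup_faq_alt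
  by_cases hg : question == "" || faq_data.isEmpty
  · simp [hg]
  · simp only [hg, Bool.false_eq_true, ite_false]
    rw [pvOnePass_eq]
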